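-- pv_equiv track=rewrite | github.com/researchxr/MsDD | tools/visualize.py | g2rel
-- ===== SOURCE A (Python) =====
-- def g2rel(graph):
--     rel = {}
--     ids = [i for i in range(len(graph))]
--
--     for id in ids:
--         graph[id][id] = 0
--
--     for id, line in zip(ids, graph):
--         nodes = [node for node, val in zip(ids, line) if val ==1]
--         for node in nodes:
--             if node not in rel:
--                 rel[node] = [id]
--             else:
--                 rel[node].append(id)
--
--     posts = set()
--     for p_id, c_ids in rel.items():
--         posts.add(p_id)
--         for id in c_ids:
--             posts.add(id)
--
--     return rel, len(posts)
-- ===== SOURCE B (Python) =====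
-- def g2rel(graph):
--     n = len(graph)
--     for i in range(n):
--         graph[i][i] = 0
--     pairs = [(node, i) for i, line in zip(range(n), graph)
--                        for node, val in zip(range(n), line) if val == 1]
--     keys = []
--     for node, _ in pairs:
--         if node not in keys:
--             keys.append(node)
--     rel = {k: [i for node, i in pairs if node == k] for k in keys}
--     members = {node for node, _ in pairs} | {i for _, i in pairs}
--     return rel, len(members)
-- ===== Notes on version B (the rewrite author's own statement) =====
-- stated objective: alternative
-- what changed: B replaces A's incremental dict-of-lists building (append-or-insert per 1-entry) with a one-shot group-by: it extracts the flat (node, row) pair list once, computes the ordered distinct keys, builds each value list by a filter over the pairs, and counts the distinct nodes directly from the pair list instead of from the finished dict.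
import Mathlib
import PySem

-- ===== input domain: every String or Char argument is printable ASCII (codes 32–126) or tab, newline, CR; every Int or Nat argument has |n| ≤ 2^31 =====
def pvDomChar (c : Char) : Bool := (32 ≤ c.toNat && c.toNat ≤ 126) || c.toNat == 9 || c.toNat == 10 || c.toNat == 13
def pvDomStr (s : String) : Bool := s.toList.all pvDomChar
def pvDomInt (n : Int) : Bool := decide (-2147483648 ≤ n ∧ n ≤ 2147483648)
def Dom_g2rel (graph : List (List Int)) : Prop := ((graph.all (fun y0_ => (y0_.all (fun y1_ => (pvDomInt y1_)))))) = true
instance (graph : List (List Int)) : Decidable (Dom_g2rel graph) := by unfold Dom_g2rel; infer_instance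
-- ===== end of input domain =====

-- B replaces A's incremental dict-of-lists with a one-shot group-by over the flat (node,row) pair
-- list and counts nodes directly from that list (objective: alternative decomposition, same cost).
-- Python A mutates `graph` in place (zeroing the diagonal); Python B performs the same mutation;
-- the equivalence proved here is about the RETURN value.

-- ===== PORT A =====
def g2rel (graph : List (List Int)) : (List (Int × List Int)) × Int :=
  let ids := PySem.List.pyRange 0 (graph.length : Int) 1
  let g := ids.foldl (fun g id => g.set id.toNat ((g.getD id.toNat []).set id.toNat 0)) graph
  let rel := (ids.zip g).foldl (fun rel il =>
      let nodes := ((ids.zip il.2).filter (fun nv => nv.2 == 1)).map (fun nv => nv.1)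
      nodes.foldl (fun rel node =>
        if rel.contains node = false then rel.insert node [il.1]
        else rel.modify node [] (fun v => v ++ [il.1])) rel)
    (PySem.Dict.empty : PySem.Dict Int (List Int))
  let posts := rel.items.foldl (fun s pc =>
      pc.2.foldl (fun s id => PySem.Set.add s id) (PySem.Set.add s pc.1))
    (PySem.Set.empty : PySem.Set Int)
  (rel.items, (posts.length : Int))

-- ===== PORT B =====
def g2rel_alt (graph : List (List Int)) : (List (Int × List Int)) × Int :=
  let rng := PySem.List.pyRange 0 (graph.length : Int) 1
  let g := rng.foldl (fun g i => g.set i.toNat ((g.getD i.toNat []).set i.toNat 0)) graph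
  let pairs := (rng.zip g).flatMap (fun il =>
      ((rng.zip il.2).filter (fun nv => nv.2 == 1)).map (fun nv => (nv.1, il.1)))
  let keys := pairs.foldl (fun ks p => if p.1 ∈ ks then ks else ks ++ [p.1]) ([] : List Int)
  let rel := keys.map (fun k => (k, (pairs.filter (fun p => p.1 == k)).map (fun p => p.2)))
  let members := PySem.Set.union (PySem.Set.ofList (pairs.map (fun p => p.1))) (pairs.map (fun p => p.2))
  (rel, (members.length : Int))

-- ===== PRECONDITION & SPEC =====
-- Pre_ excludes exactly the graphs on which row i is too short for graph[i][i] = 0, where Python A raises IndexError.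
def Pre_g2rel (graph : List (List Int)) : Prop :=
  ∀ i ∈ List.range graph.length, i < (graph.getD i []).length
instance (graph : List (List Int)) : Decidable (Pre_g2rel graph) := by unfold Pre_g2rel; infer_instance
def pvWitness_g2rel : List (List Int) := [[0, 1], [1, 0]]
def Spec_g2rel (graph : List (List Int)) (out : (List (Int × List Int)) × Int) : Prop := out = g2rel_alt graph
instance (graph : List (List Int)) (out : (List (Int × List Int)) × Int) : Decidable (Spec_g2rel graph out) := by unfold Spec_g2rel; infer_instance

-- ===== CLAIM (what is proved, stated in full; the proofs are below) =====
def Claim_equal_g2rel : Prop := ∀ (graph : List (List Int)), Dom_g2rel graph → Pre_g2rel graph → Spec_g2rel graph (g2rel graph)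

-- ===== LEMMAS AND PROOFS =====

-- A's dict step (if-contains insert/append) is exactly Dict.modify with default [].
lemma stepA_eq_modify (d : PySem.Dict Int (List Int)) (node id : Int) :
    (if d.contains node = false then d.insert node [id]
     else d.modify node [] (fun v => v ++ [id])) =
    d.modify node [] (fun v => v ++ [id]) := by
  by_cases h : d.contains node = false
  · simp only [h, if_true]
    simp [PySem.Dict.modify, PySem.Dict.getD_of_not_contains d [] h]
  · simp [h]

-- membership in A's posts-building fold
lemma mem_posts_fold (items : List (Int × List Int)) (s : PySem.Set Int) (y : Int) :
    y ∈ items.foldl (fun s pc =>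
        pc.2.foldl (fun s id => PySem.Set.add s id) (PySem.Set.add s pc.1)) s ↔
    y ∈ s ∨ ∃ pc ∈ items, y = pc.1 ∨ y ∈ pc.2 := by
  induction items generalizing s with
  | nil => simp
  | cons pc rest ih =>
    rw [List.foldl_cons, ih]
    rw [PySem.Set.mem_foldl_add pc.2 (fun x => x) (PySem.Set.add s pc.1) y]
    simp only [List.mem_cons, PySem.Set.mem_add]
    constructor
    · rintro (((h | h) | ⟨b, hb, rfl⟩) | ⟨q, hq, hy⟩)
      · exact Or.inl h
      · exact Or.inr ⟨pc, Or.inl rfl, Or.inl h⟩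
      · exact Or.inr ⟨pc, Or.inl rfl, Or.inr hb⟩
      · exact Or.inr ⟨q, Or.inr hq, hy⟩
    · rintro (h | ⟨q, rfl | hq, hy⟩)
      · exact Or.inl (Or.inl (Or.inl h))
      · rcases hy with h | h
        · exact Or.inl (Or.inl (Or.inr h))
        · exact Or.inl (Or.inr ⟨y, h, rfl⟩)
      · exact Or.inr ⟨q, hq, hy⟩

-- A's posts-building fold preserves Nodup
lemma nodup_posts_fold (items : List (Int × List Int)) (s : PySem.Set Int) (hs : s.Nodup) :
    (items.foldl (fun s pc =>
        pc.2.foldl (fun s id => PySem.Set.add s id) (PySem.Set.add s pc.1)) s).Nodup := by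
  induction items generalizing s with
  | nil => exact hs
  | cons pc rest ih =>
    rw [List.foldl_cons]
    apply ih
    have h2 : pc.2.foldl (fun s id => PySem.Set.add s id) (PySem.Set.add s pc.1) =
        PySem.Set.update (PySem.Set.add s pc.1) pc.2 := by
      rw [← List.map_id' pc.2, PySem.Set.update_map_eq_foldl_add pc.2 (fun x => x), List.map_id']
    rw [h2]
    exact PySem.Set.nodup_update _ _ (PySem.Set.nodup_add s pc.1 hs)

-- ===== VERDICT (by name: the statement is the Claim_ definition above) =====
theorem g2rel_spec : Claim_equal_g2rel := by
  intro graph _ _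
  unfold Spec_g2rel
  simp only [g2rel, g2rel_alt]
  set ids := PySem.List.pyRange 0 (graph.length : Int) 1 with hids
  set g := ids.foldl (fun g id => g.set id.toNat ((g.getD id.toNat []).set id.toNat 0)) graph with hg
  set pairs := (ids.zip g).flatMap (fun il =>
      ((ids.zip il.2).filter (fun nv => nv.2 == 1)).map (fun nv => (nv.1, il.1))) with hpairs
  -- A's dict fold = modify-fold over the flat pair list
  have hrelA : ((ids.zip g).foldl (fun rel il =>
      (((ids.zip il.2).filter (fun nv => nv.2 == 1)).map (fun nv => nv.1)).foldl
        (fun rel node =>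
          if rel.contains node = false then rel.insert node [il.1]
          else rel.modify node [] (fun v => v ++ [il.1])) rel)
      (PySem.Dict.empty : PySem.Dict Int (List Int))) =
      pairs.foldl (fun d p => d.modify p.1 [] (fun v => v ++ [p.2]))
        (PySem.Dict.empty : PySem.Dict Int (List Int)) := by
    rw [hpairs, List.foldl_flatMap]
    apply PySem.List.foldl_congr_mem
    intro d il _
    rw [List.foldl_map, List.foldl_map]
    apply PySem.List.foldl_congr_mem
    intro d' nv _
    exact stepA_eq_modify d' nv.1 il.1
  rw [hrelA]
  set relA := pairs.foldl (fun d p => d.modify p.1 [] (fun v => v ++ [p.2]))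
      (PySem.Dict.empty : PySem.Dict Int (List Int)) with hrel
  -- keys of relA
  have hkeys : relA.keys = PySem.Set.ofList (pairs.map (fun p => p.1)) := by
    rw [hrel, PySem.Dict.keys_foldl_modify_key pairs (fun p => p.1) [] (fun _ p v => v ++ [p.2])]
    simp [PySem.Set.ofList_eq_foldl]
    rfl
  have hnodup : relA.keys.Nodup := by
    rw [hkeys]; exact PySem.Set.nodup_ofList _
  -- B's keys fold is Set.ofList of the firsts
  have hkeysB : pairs.foldl (fun ks p => if p.1 ∈ ks then ks else ks ++ [p.1]) ([] : List Int) =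
      PySem.Set.ofList (pairs.map (fun p => p.1)) := by
    rw [PySem.Set.ofList_eq_foldl, List.foldl_map]
    apply PySem.List.foldl_congr_mem
    intro s p _
    rw [PySem.Set.add_eq_ite]
  -- items of relA = B's rel
  have hitems : relA.items = (pairs.foldl (fun ks p => if p.1 ∈ ks then ks else ks ++ [p.1])
      ([] : List Int)).map (fun k => (k, (pairs.filter (fun p => p.1 == k)).map (fun p => p.2))) := by
    rw [hkeysB, ← hkeys, PySem.Dict.items_eq_map_keys relA hnodup []]
    apply List.map_congr_left
    intro k _
    have := PySem.Dict.getD_foldl_modify_append pairs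
      (PySem.Dict.empty : PySem.Dict Int (List Int)) k
    rw [hrel, this]
    simp [PySem.Dict.getD_empty]
  -- the counts
  set posts := relA.items.foldl (fun s pc =>
      pc.2.foldl (fun s id => PySem.Set.add s id) (PySem.Set.add s pc.1))
    (PySem.Set.empty : PySem.Set Int) with hposts
  set members := PySem.Set.union (PySem.Set.ofList (pairs.map (fun p => p.1)))
      (pairs.map (fun p => p.2)) with hmembers
  have hmemiff : ∀ y, y ∈ posts ↔ y ∈ members := by
    intro y
    rw [hposts, mem_posts_fold, hmembers, PySem.Set.mem_union, PySem.Set.mem_ofList]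
    constructor
    · rintro (h | ⟨pc, hpc, hy⟩)
      · simp [PySem.Set.empty] at h
      · rw [PySem.Dict.items_eq_map_keys relA hnodup []] at hpc
        obtain ⟨k, hk, rfl⟩ := List.mem_map.mp hpc
        rw [hkeys, PySem.Set.mem_ofList] at hk
        rcases hy with rfl | hy
        · exact Or.inl hk
        · right
          have := PySem.Dict.getD_foldl_modify_append pairs
            (PySem.Dict.empty : PySem.Dict Int (List Int)) k
          rw [← hrel] at this
          simp only [this, PySem.Dict.getD_empty, List.nil_append] at hy
          obtain ⟨p, hp, rfl⟩ := List.mem_map.mp hy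
          exact List.mem_map.mpr ⟨p, List.mem_of_mem_filter hp, rfl⟩
    · rintro (h | h)
      · obtain ⟨p, hp, rfl⟩ := List.mem_map.mp h
        refine Or.inr ⟨(p.1, relA.getD p.1 []), ?_, Or.inl rfl⟩
        rw [PySem.Dict.items_eq_map_keys relA hnodup []]
        refine List.mem_map.mpr ⟨p.1, ?_, rfl⟩
        rw [hkeys, PySem.Set.mem_ofList]
        exact List.mem_map.mpr ⟨p, hp, rfl⟩
      · obtain ⟨p, hp, rfl⟩ := List.mem_map.mp h
        refine Or.inr ⟨(p.1, relA.getD p.1 []), ?_, Or.inr ?_⟩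
        · rw [PySem.Dict.items_eq_map_keys relA hnodup []]
          refine List.mem_map.mpr ⟨p.1, ?_, rfl⟩
          rw [hkeys, PySem.Set.mem_ofList]
          exact List.mem_map.mpr ⟨p, hp, rfl⟩
        · have := PySem.Dict.getD_foldl_modify_append pairs
            (PySem.Dict.empty : PySem.Dict Int (List Int)) p.1
          rw [← hrel] at this
          simp only [this, PySem.Dict.getD_empty, List.nil_append]
          exact List.mem_map.mpr ⟨p, List.mem_filter.mpr ⟨hp, by simp⟩, rfl⟩
  have hnp : posts.Nodup := nodup_posts_fold _ _ (by simp [PySem.Set.empty])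
  have hnm : members.Nodup :=
    PySem.Set.nodup_union _ _ (PySem.Set.nodup_ofList _)
  have hlen : posts.length = members.length :=
    ((List.perm_ext_iff_of_nodup hnp hnm).mpr hmemiff).length_eq
  rw [← hitems, hlen]
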